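-- pv_equiv track=rewrite | github.com/luxonis/luxonis-ml | luxonis_ml/utils/graph.py | is_acyclic
-- ===== SOURCE A (Python) =====
-- from typing import Dict, Iterator, List, Mapping, Set, Tuple, TypeVar
--
-- def is_acyclic(graph: Dict[str, List[str]]) -> bool:
--     """Tests if graph is acyclic.
--
--     @type graph: dict[str, list[str]]
--     @param graph: Graph in a format of a dictionary of predecessors.
--     @rtype: bool
--     @return: True if graph is acyclic, False otherwise.
--     """
--     graph = graph.copy()
--
--     def dfs(node: str, visited: Set[str], recursion_stack: Set[str]) -> bool:
--         visited.add(node)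
--         recursion_stack.add(node)
--
--         for predecessor in graph.get(node, []):
--             if predecessor in recursion_stack:
--                 return True
--             if predecessor not in visited and dfs(
--                 predecessor, visited, recursion_stack
--             ):
--                 return True
--
--         recursion_stack.remove(node)
--         return False
--
--     visited: set[str] = set()
--     recursion_stack: set[str] = set()
--
--     for node in graph:
--         if node not in visited and dfs(node, visited, recursion_stack):
--             return False
--
--     return True
-- ===== SOURCE B (Python) =====
-- def is_acyclic(graph):
--     """Tests if graph (dict of predecessor lists) is acyclic, by iterated
--     elimination: repeatedly drop every node all of whose predecessors are
--     already dropped; the graph is acyclic iff every node gets dropped."""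
--     remaining = set(graph)
--     while True:
--         nxt = {u for u in remaining if any(p in remaining for p in graph[u])}
--         if nxt == remaining:
--             return not remaining
--         remaining = nxt
-- ===== Notes on version B (the rewrite author's own statement) =====
-- stated objective: alternative
-- what changed: Replaces the recursive three-colour DFS (visited + recursion stack) with an iterative Kahn-style fixpoint: repeatedly delete every node whose predecessors are all deleted and return whether the whole key set empties, which also avoids Python recursion-depth limits.
import Mathlib
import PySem

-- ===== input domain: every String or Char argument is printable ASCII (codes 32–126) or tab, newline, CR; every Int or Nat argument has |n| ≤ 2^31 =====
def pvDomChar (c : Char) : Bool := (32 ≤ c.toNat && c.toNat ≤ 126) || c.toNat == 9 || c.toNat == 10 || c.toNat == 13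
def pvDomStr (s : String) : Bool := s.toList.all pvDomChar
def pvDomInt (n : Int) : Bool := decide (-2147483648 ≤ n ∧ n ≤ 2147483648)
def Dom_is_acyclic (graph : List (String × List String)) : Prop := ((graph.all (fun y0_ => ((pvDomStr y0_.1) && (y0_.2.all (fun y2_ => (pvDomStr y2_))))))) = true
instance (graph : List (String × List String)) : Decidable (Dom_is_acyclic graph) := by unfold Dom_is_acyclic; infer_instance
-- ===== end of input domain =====

-- B replaces the recursive DFS cycle check with an iterative Kahn-style fixpoint
-- (repeatedly delete nodes whose predecessors are all deleted); same return value.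

-- ===== PORT A =====
-- graph.get(node, []) on the predecessor dict
def pvGet (g : List (String × List String)) (u : String) : List String :=
  PySem.Dict.getD (PySem.Dict.mk g) u []

-- the 'for predecessor in graph.get(node, [])' loop of dfs; dfsF is the recursive call
-- (at one unit of fuel less).  Branches in Python's order.
def pvDfsGo (dfsF : String → PySem.Set String → PySem.Set String → PySem.Set String × Bool)
    (st : PySem.Set String) :
    List String → PySem.Set String → PySem.Set String × Bool
  | [], v => (v, false)      -- loop ends; Python then does recursion_stack.remove(node):
                             -- the pure port passes the stack downward only, so no action is needed
  | p :: ps, v =>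
    if PySem.Set.contains st p then (v, true)
    else if !(PySem.Set.contains v p) then
      match dfsF p v st with
      | (v', true) => (v', true)
      | (v', false) => pvDfsGo dfsF st ps v'
    else pvDfsGo dfsF st ps v

-- dfs(node, visited, recursion_stack); fuel only makes the Python recursion structural
-- (the fuel supplied by pvMain is never exhausted on any input)
def pvDfs (g : List (String × List String)) :
    Nat → String → PySem.Set String → PySem.Set String → PySem.Set String × Bool
  | 0, _, v, _ => (v, true)
  | fuel + 1, node, visited, stack =>
    let v := PySem.Set.add visited node
    let st := PySem.Set.add stack node
    pvDfsGo (pvDfs g fuel) st (pvGet g node) v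

def pvFuel (g : List (String × List String)) : Nat :=
  (g.map Prod.fst ++ g.flatMap Prod.snd).length + 1

-- the top-level 'for node in graph' loop (recursion_stack is empty between iterations)
def pvMain (g : List (String × List String)) :
    List String → PySem.Set String → Bool
  | [], _ => true
  | k :: ks, visited =>
    if !(PySem.Set.contains visited k) then
      match pvDfs g (pvFuel g) k visited PySem.Set.empty with
      | (_, true) => false
      | (v', false) => pvMain g ks v'
    else pvMain g ks visited

def is_acyclic (graph : List (String × List String)) : Bool :=
  pvMain graph (graph.map Prod.fst) PySem.Set.empty

-- ===== PORT B =====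
-- termination of the while-loop: an unequal filtered set is strictly shorter
theorem pvFilter_lt {p : String → Bool} {l : List String}
    (h : PySem.Set.equal (l.filter p) l ≠ true) : (l.filter p).length < l.length := by
  rcases Nat.lt_or_ge (l.filter p).length l.length with hlt | hge
  · exact hlt
  · exfalso
    have hlen : (l.filter p).length = l.length :=
      le_antisymm (List.length_filter_le _ _) hge
    have hall : ∀ a ∈ l, p a = true := (List.length_filter_eq_length_iff).mp hlen
    rw [List.filter_eq_self.mpr hall] at h
    have : PySem.Set.equal l l = true := (PySem.Set.equal_iff l l).mpr (fun _ => Iff.rfl)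
    simp [this] at h

-- the 'while True' loop of B: one round keeps exactly the nodes with a live predecessor
-- (nxt is a filter of remaining, so Python's set equality nxt == remaining is Set.equal)
-- nxt = {u for u in remaining if any(p in remaining for p in graph[u])}
def pvStep (g : List (String × List String)) (rem : PySem.Set String) : PySem.Set String :=
  rem.filter (fun u => (pvGet g u).any (fun p => PySem.Set.contains rem p))

def pvPrune (g : List (String × List String)) (rem : PySem.Set String) : Bool :=
  if h : PySem.Set.equal (pvStep g rem) rem = true then rem.isEmpty
  else pvPrune g (pvStep g rem)
termination_by rem.length
decreasing_by exact pvFilter_lt h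

def is_acyclic_alt (graph : List (String × List String)) : Bool :=
  pvPrune graph (PySem.Set.ofList (graph.map Prod.fst))

-- ===== PRECONDITION & SPEC =====
def Spec_is_acyclic (graph : List (String × List String)) (out : Bool) : Prop := out = is_acyclic_alt graph
instance (graph : List (String × List String)) (out : Bool) : Decidable (Spec_is_acyclic graph out) := by unfold Spec_is_acyclic; infer_instance

-- ===== CLAIM (what is proved, stated in full; the proofs are below) =====
def Claim_equal_is_acyclic : Prop := ∀ (graph : List (String × List String)), Dom_is_acyclic graph → Spec_is_acyclic graph (is_acyclic graph)

-- ===== LEMMAS AND PROOFS =====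

-- the bridge invariant: both programs return true exactly when some rank function
-- strictly decreases along every key-to-key predecessor edge
def pvKeys (g : List (String × List String)) : List String := g.map Prod.fst

def pvAcyc (g : List (String × List String)) : Prop :=
  ∃ r : String → Nat, ∀ u p, u ∈ pvKeys g → p ∈ pvGet g u → p ∈ pvKeys g → r p < r u

-- node universe (keys and all predecessors), for the fuel argument
def pvU (g : List (String × List String)) : Finset String :=
  (g.map Prod.fst ++ g.flatMap Prod.snd).toFinset

theorem pvGet_ne_nil_mem {g : List (String × List String)} {u : String}
    (h : pvGet g u ≠ []) : u ∈ pvKeys g := by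
  by_contra hu
  apply h
  have hc : (PySem.Dict.mk g).contains u = false := by
    rw [PySem.Dict.contains_eq_decide_mem_keys]
    simpa [pvKeys, PySem.Dict.keys] using hu
  unfold pvGet
  exact PySem.Dict.getD_of_not_contains _ _ hc

theorem pvGet_subset_U {g : List (String × List String)} {u p : String}
    (h : p ∈ pvGet g u) : p ∈ pvU g := by
  have hsome : (PySem.Dict.mk g).get? u = some (pvGet g u) := by
    cases hq : (PySem.Dict.mk g).get? u with
    | none =>
      exfalso
      have : pvGet g u = [] := by
        simp [pvGet, PySem.Dict.getD_eq_get?_getD, hq]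
      rw [this] at h; cases h
    | some l =>
      have : pvGet g u = l := by
        simp [pvGet, PySem.Dict.getD_eq_get?_getD, hq]
      rw [this]
  have hmem : (u, pvGet g u) ∈ (PySem.Dict.mk g).items :=
    PySem.Dict.mem_items_of_get?_eq_some _ hsome
  have hg : (u, pvGet g u) ∈ g := by simpa [PySem.Dict.items] using hmem
  have : p ∈ g.flatMap Prod.snd := List.mem_flatMap.mpr ⟨(u, pvGet g u), hg, h⟩
  simp only [pvU, List.mem_toFinset, List.mem_append]
  exact Or.inr this

theorem pvKeys_subset_U {g : List (String × List String)} {u : String}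
    (h : u ∈ pvKeys g) : u ∈ pvU g := by
  simp only [pvU, List.mem_toFinset, List.mem_append]
  exact Or.inl h

-- ===== B-side =====

theorem pvPrune_rank_aux (g : List (String × List String)) :
    ∀ n rem, rem.length ≤ n → pvPrune g rem = true →
      ∃ r : String → Nat, ∀ u p, u ∈ rem → p ∈ pvGet g u → p ∈ rem → r p < r u := by
  intro n
  induction n with
  | zero =>
    intro rem hlen _
    have : rem = [] := List.eq_nil_of_length_eq_zero (Nat.le_zero.mp hlen)
    subst this
    exact ⟨fun _ => 0, by intro u p hu; cases hu⟩
  | succ n ih =>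
    intro rem hlen htrue
    rw [pvPrune.eq_def] at htrue
    by_cases h : PySem.Set.equal (pvStep g rem) rem = true
    · rw [dif_pos h] at htrue
      have : rem = [] := List.isEmpty_iff.mp htrue
      subst this
      exact ⟨fun _ => 0, by intro u p hu; cases hu⟩
    · rw [dif_neg h] at htrue
      have hlt : (pvStep g rem).length < rem.length := pvFilter_lt h
      obtain ⟨r', hr'⟩ := ih (pvStep g rem) (by omega) htrue
      refine ⟨fun u => if u ∈ pvStep g rem then r' u + 1 else 0, ?_⟩
      intro u p hu hp hprem
      have hu' : u ∈ pvStep g rem := by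
        simp only [pvStep, List.mem_filter]
        refine ⟨hu, ?_⟩
        simp only [List.any_eq_true]
        exact ⟨p, hp, (PySem.Set.contains_iff _ _).mpr hprem⟩
      show (if p ∈ pvStep g rem then r' p + 1 else 0) <
        (if u ∈ pvStep g rem then r' u + 1 else 0)
      rw [if_pos hu']
      by_cases hp' : p ∈ pvStep g rem
      · rw [if_pos hp']
        exact Nat.succ_lt_succ (hr' u p hu' hp hp')
      · rw [if_neg hp']
        omega

theorem pvPrune_rank (g : List (String × List String)) :
    ∀ rem, pvPrune g rem = true →
      ∃ r : String → Nat, ∀ u p, u ∈ rem → p ∈ pvGet g u → p ∈ rem → r p < r u :=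
  fun rem => pvPrune_rank_aux g rem.length rem le_rfl

theorem pvPrune_false_aux (g : List (String × List String)) :
    ∀ n rem, rem.length ≤ n → (∀ x ∈ rem, x ∈ pvKeys g) → pvPrune g rem = false →
      ¬ pvAcyc g := by
  intro n
  induction n with
  | zero =>
    intro rem hlen hkeys hfalse
    have : rem = [] := List.eq_nil_of_length_eq_zero (Nat.le_zero.mp hlen)
    subst this
    rw [pvPrune.eq_def] at hfalse
    have heq : PySem.Set.equal (pvStep g []) [] = true :=
      (PySem.Set.equal_iff _ _).mpr (by simp [pvStep])
    rw [dif_pos heq] at hfalse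
    simp at hfalse
  | succ n ih =>
    intro rem hlen hkeys hfalse
    rw [pvPrune.eq_def] at hfalse
    by_cases h : PySem.Set.equal (pvStep g rem) rem = true
    · rw [dif_pos h] at hfalse
      have hne : rem ≠ [] := by
        intro hnil
        rw [hnil] at hfalse
        simp at hfalse
      rintro ⟨r, hr⟩
      have hfix : ∀ u ∈ rem, ∃ p ∈ pvGet g u, p ∈ rem := by
        intro u hu
        have : u ∈ pvStep g rem := ((PySem.Set.equal_iff _ _).mp h u).mpr hu
        simp only [pvStep, List.mem_filter] at this
        obtain ⟨-, hcond⟩ := this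
        simp only [List.any_eq_true] at hcond
        obtain ⟨p, hp, hpc⟩ := hcond
        exact ⟨p, hp, (PySem.Set.contains_iff _ _).mp hpc⟩
      have hnonempty : rem.toFinset.Nonempty := by
        rcases rem with _ | ⟨x, xs⟩
        · exact absurd rfl hne
        · exact ⟨x, by simp⟩
      obtain ⟨u0, hu0, hmin⟩ := Finset.exists_min_image rem.toFinset r hnonempty
      rw [List.mem_toFinset] at hu0
      obtain ⟨p, hp, hprem⟩ := hfix u0 hu0
      have h1 : r p < r u0 := hr u0 p (hkeys u0 hu0) hp (hkeys p hprem)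
      have h2 : r u0 ≤ r p := hmin p (List.mem_toFinset.mpr hprem)
      omega
    · rw [dif_neg h] at hfalse
      have hlt : (pvStep g rem).length < rem.length := pvFilter_lt h
      exact ih (pvStep g rem) (by omega)
        (fun x hx => hkeys x (List.mem_filter.mp hx).1) hfalse

theorem pvPrune_false (g : List (String × List String)) :
    ∀ rem, (∀ x ∈ rem, x ∈ pvKeys g) → pvPrune g rem = false → ¬ pvAcyc g :=
  fun rem => pvPrune_false_aux g rem.length rem le_rfl

-- ===== A-side, rank → dfs finds nothing =====

theorem pvGo_false (g : List (String × List String)) (r : String → Nat)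
    (hr : ∀ u p, u ∈ pvKeys g → p ∈ pvGet g u → p ∈ pvKeys g → r p < r u)
    (node : String) (stack : PySem.Set String) (f : Nat)
    (hstack : node ∈ pvKeys g → ∀ s ∈ stack, s ∈ pvKeys g ∧ r node < r s)
    (dfsF : String → PySem.Set String → PySem.Set String → PySem.Set String × Bool)
    (hdfs : ∀ q v, q ∈ pvU g → q ∉ v → v.toFinset ⊆ pvU g →
      (pvU g \ v.toFinset).card < f →
      (q ∈ pvKeys g → ∀ s ∈ PySem.Set.add stack node, s ∈ pvKeys g ∧ r q < r s) →
      (dfsF q v (PySem.Set.add stack node)).2 = false ∧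
      (dfsF q v (PySem.Set.add stack node)).1.toFinset ⊆ pvU g ∧
      (∀ x ∈ v, x ∈ (dfsF q v (PySem.Set.add stack node)).1)) :
    ∀ ps v, (∀ q ∈ ps, q ∈ pvGet g node) → v.toFinset ⊆ pvU g →
      (pvU g \ v.toFinset).card < f →
      (pvDfsGo dfsF (PySem.Set.add stack node) ps v).2 = false ∧
      (pvDfsGo dfsF (PySem.Set.add stack node) ps v).1.toFinset ⊆ pvU g ∧
      (∀ x ∈ v, x ∈ (pvDfsGo dfsF (PySem.Set.add stack node) ps v).1) := by
  intro ps
  induction ps with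
  | nil =>
    intro v _ hv _
    exact ⟨rfl, hv, fun x hx => hx⟩
  | cons p ps ih =>
    intro v hps hv hcard
    have hp : p ∈ pvGet g node := hps p (List.mem_cons_self)
    have hnodek : node ∈ pvKeys g :=
      pvGet_ne_nil_mem (List.ne_nil_of_mem hp)
    have hstk := hstack hnodek
    have hstnot : PySem.Set.contains (PySem.Set.add stack node) p = false := by
      rcases Bool.eq_false_or_eq_true (PySem.Set.contains (PySem.Set.add stack node) p)
        with ht | hfb
      · exfalso
        have hmem := (PySem.Set.contains_iff _ _).mp ht
        rcases (PySem.Set.mem_add _ _ _).mp hmem with hins | heqn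
        · obtain ⟨hpk, hlt⟩ := hstk p hins
          have := hr node p hnodek hp hpk
          omega
        · subst heqn
          have := hr p p hnodek hp hnodek
          omega
      · exact hfb
    rw [pvDfsGo, hstnot]
    simp only [Bool.false_eq_true, if_false]
    by_cases hpv : p ∈ v
    · have hcv : PySem.Set.contains v p = true := (PySem.Set.contains_iff _ _).mpr hpv
      rw [hcv]
      simp only [Bool.not_true, Bool.false_eq_true, if_false]
      exact ih v (fun q hq => hps q (List.mem_cons_of_mem _ hq)) hv hcard
    · have hcv : PySem.Set.contains v p = false := by
        rcases Bool.eq_false_or_eq_true (PySem.Set.contains v p) with ht | hfb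
        · exact absurd ((PySem.Set.contains_iff _ _).mp ht) hpv
        · exact hfb
      rw [hcv]
      simp only [Bool.not_false, if_true]
      have hstkrec : p ∈ pvKeys g →
          ∀ s ∈ PySem.Set.add stack node, s ∈ pvKeys g ∧ r p < r s := by
        intro hpk s hs
        have hpn : r p < r node := hr node p hnodek hp hpk
        rcases (PySem.Set.mem_add _ _ _).mp hs with hins | heqn
        · obtain ⟨hsk, hlt⟩ := hstk s hins
          exact ⟨hsk, by omega⟩
        · subst heqn
          exact ⟨hnodek, hpn⟩
      obtain ⟨hbf, hsub', hmono⟩ :=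
        hdfs p v (pvGet_subset_U hp) hpv hv hcard hstkrec
      cases hres : dfsF p v (PySem.Set.add stack node) with
      | mk v' b =>
        rw [hres] at hbf hsub' hmono
        simp only at hbf hsub' hmono
        subst hbf
        have hcard' : (pvU g \ v'.toFinset).card < f := by
          have hsubv : v.toFinset ⊆ v'.toFinset := by
            intro x hx
            exact List.mem_toFinset.mpr (hmono x (List.mem_toFinset.mp hx))
          exact Nat.lt_of_le_of_lt
            (Finset.card_le_card (Finset.sdiff_subset_sdiff (Finset.Subset.refl _) hsubv)) hcard
        obtain ⟨h1, h2, h3⟩ :=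
          ih v' (fun q hq => hps q (List.mem_cons_of_mem _ hq)) hsub' hcard'
        exact ⟨h1, h2, fun x hx => h3 x (hmono x hx)⟩

theorem pvDfs_false (g : List (String × List String)) (r : String → Nat)
    (hr : ∀ u p, u ∈ pvKeys g → p ∈ pvGet g u → p ∈ pvKeys g → r p < r u) :
    ∀ fuel node visited stack, node ∈ pvU g → node ∉ visited →
      visited.toFinset ⊆ pvU g → (pvU g \ visited.toFinset).card < fuel →
      (node ∈ pvKeys g → ∀ s ∈ stack, s ∈ pvKeys g ∧ r node < r s) →
      (pvDfs g fuel node visited stack).2 = false ∧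
      (pvDfs g fuel node visited stack).1.toFinset ⊆ pvU g ∧
      (∀ x ∈ visited, x ∈ (pvDfs g fuel node visited stack).1) := by
  intro fuel
  induction fuel with
  | zero =>
    intro node visited stack _ _ _ hcard _
    omega
  | succ f ihf =>
    intro node visited stack hU hnv hvsub hcard hstack
    have hadd : PySem.Set.add visited node = visited ++ [node] :=
      PySem.Set.add_of_not_mem hnv
    have hv1fin : (PySem.Set.add visited node).toFinset =
        insert node visited.toFinset := by
      rw [hadd]
      simp [List.toFinset_append]
    have hv1sub : (PySem.Set.add visited node).toFinset ⊆ pvU g := by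
      rw [hv1fin]
      exact Finset.insert_subset hU hvsub
    have hcard1 : (pvU g \ (PySem.Set.add visited node).toFinset).card < f := by
      rw [hv1fin, Finset.sdiff_insert]
      have hmem : node ∈ pvU g \ visited.toFinset :=
        Finset.mem_sdiff.mpr ⟨hU, fun hc => hnv (List.mem_toFinset.mp hc)⟩
      rw [Finset.card_erase_of_mem hmem]
      have hpos : 0 < (pvU g \ visited.toFinset).card :=
        Finset.card_pos.mpr ⟨node, hmem⟩
      omega
    have hdfs : ∀ q v, q ∈ pvU g → q ∉ v → v.toFinset ⊆ pvU g →
        (pvU g \ v.toFinset).card < f →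
        (q ∈ pvKeys g → ∀ s ∈ PySem.Set.add stack node, s ∈ pvKeys g ∧ r q < r s) →
        (pvDfs g f q v (PySem.Set.add stack node)).2 = false ∧
        (pvDfs g f q v (PySem.Set.add stack node)).1.toFinset ⊆ pvU g ∧
        (∀ x ∈ v, x ∈ (pvDfs g f q v (PySem.Set.add stack node)).1) := by
      intro q v hqU hqv hvs hc hstk
      exact ihf q v (PySem.Set.add stack node) hqU hqv hvs hc hstk
    obtain ⟨h1, h2, h3⟩ :=
      pvGo_false g r hr node stack f hstack (pvDfs g f) hdfs
        (pvGet g node) (PySem.Set.add visited node) (fun q hq => hq) hv1sub hcard1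
    refine ⟨h1, h2, fun x hx => h3 x ?_⟩
    rw [hadd]
    exact List.mem_append_left _ hx

theorem pvMain_true (g : List (String × List String)) (h : pvAcyc g) :
    ∀ ks visited, (∀ k ∈ ks, k ∈ pvKeys g) → visited.toFinset ⊆ pvU g →
      pvMain g ks visited = true := by
  obtain ⟨r, hr⟩ := h
  intro ks
  induction ks with
  | nil => intro visited _ _; rfl
  | cons k ks ih =>
    intro visited hks hvsub
    rw [pvMain]
    by_cases hk : PySem.Set.contains visited k = true
    · rw [hk]
      simp only [Bool.not_true, Bool.false_eq_true, if_false]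
      exact ih visited (fun x hx => hks x (List.mem_cons_of_mem _ hx)) hvsub
    · have hkf : PySem.Set.contains visited k = false := by
        rcases Bool.eq_false_or_eq_true (PySem.Set.contains visited k) with ht | hfb
        · exact absurd ht hk
        · exact hfb
      rw [hkf]
      simp only [Bool.not_false, if_true]
      have hknv : k ∉ visited := fun hm => hk ((PySem.Set.contains_iff _ _).mpr hm)
      have hkk : k ∈ pvKeys g := hks k (List.mem_cons_self)
      have hcard : (pvU g \ visited.toFinset).card < pvFuel g := by
        have h1 : (pvU g \ visited.toFinset).card ≤ (pvU g).card :=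
          Finset.card_le_card (Finset.sdiff_subset)
        have h2 : (pvU g).card ≤ (g.map Prod.fst ++ g.flatMap Prod.snd).length :=
          List.toFinset_card_le _
        unfold pvFuel
        omega
      obtain ⟨h1, h2, _⟩ :=
        pvDfs_false g r hr (pvFuel g) k visited PySem.Set.empty
          (pvKeys_subset_U hkk) hknv hvsub hcard
          (fun _ s hs => absurd hs (by simp [PySem.Set.empty]))
      cases hres : pvDfs g (pvFuel g) k visited PySem.Set.empty with
      | mk v' b =>
        rw [hres] at h1 h2
        simp only at h1 h2
        subst h1
        exact ih v' (fun x hx => hks x (List.mem_cons_of_mem _ hx)) h2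

-- ===== A-side, ghost run recording the finish order =====

def pvGoG (dfsF : String → PySem.Set String → PySem.Set String → List String →
      PySem.Set String × List String × Bool)
    (st : PySem.Set String) :
    List String → PySem.Set String → List String → PySem.Set String × List String × Bool
  | [], v, fin => (v, fin, false)
  | p :: ps, v, fin =>
    if PySem.Set.contains st p then (v, fin, true)
    else if !(PySem.Set.contains v p) then
      match dfsF p v st fin with
      | (v', fin', true) => (v', fin', true)
      | (v', fin', false) => pvGoG dfsF st ps v' fin'
    else pvGoG dfsF st ps v fin

def pvDfsG (g : List (String × List String)) :
    Nat → String → PySem.Set String → PySem.Set String → List String →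
      PySem.Set String × List String × Bool
  | 0, _, v, _, fin => (v, fin, true)
  | fuel + 1, node, visited, stack, fin =>
    let v := PySem.Set.add visited node
    let st := PySem.Set.add stack node
    match pvGoG (pvDfsG g fuel) st (pvGet g node) v fin with
    | (v', fin', true) => (v', fin', true)
    | (v', fin', false) => (v', fin' ++ [node], false)

def pvMainG (g : List (String × List String)) :
    List String → PySem.Set String → List String → Bool
  | [], _, _ => true
  | k :: ks, visited, fin =>
    if !(PySem.Set.contains visited k) then
      match pvDfsG g (pvFuel g) k visited PySem.Set.empty fin with
      | (_, _, true) => false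
      | (v', fin', false) => pvMainG g ks v' fin'
    else pvMainG g ks visited fin

theorem pvGoG_proj
    (dfsF : String → PySem.Set String → PySem.Set String → PySem.Set String × Bool)
    (dfsFG : String → PySem.Set String → PySem.Set String → List String →
      PySem.Set String × List String × Bool)
    (st : PySem.Set String)
    (hproj : ∀ q v fin, (dfsFG q v st fin).1 = (dfsF q v st).1 ∧
      (dfsFG q v st fin).2.2 = (dfsF q v st).2) :
    ∀ ps v fin,
      (pvGoG dfsFG st ps v fin).1 = (pvDfsGo dfsF st ps v).1 ∧
      (pvGoG dfsFG st ps v fin).2.2 = (pvDfsGo dfsF st ps v).2 := by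
  intro ps
  induction ps with
  | nil => intro v fin; exact ⟨rfl, rfl⟩
  | cons p ps ih =>
    intro v fin
    rw [pvGoG, pvDfsGo]
    by_cases hst : PySem.Set.contains st p = true
    · rw [hst]; simp
    · have hstf : PySem.Set.contains st p = false := by
        rcases Bool.eq_false_or_eq_true (PySem.Set.contains st p) with ht | hfb
        · exact absurd ht hst
        · exact hfb
      rw [hstf]
      simp only [Bool.false_eq_true, if_false]
      by_cases hpv : PySem.Set.contains v p = true
      · rw [hpv]
        simp only [Bool.not_true, Bool.false_eq_true, if_false]
        exact ih v fin
      · have hpvf : PySem.Set.contains v p = false := by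
          rcases Bool.eq_false_or_eq_true (PySem.Set.contains v p) with ht | hfb
          · exact absurd ht hpv
          · exact hfb
        rw [hpvf]
        simp only [Bool.not_false, if_true]
        obtain ⟨hp1, hp2⟩ := hproj p v fin
        cases hresG : dfsFG p v st fin with
        | mk vg rest =>
          cases rest with
          | mk fing bg =>
            cases hres : dfsF p v st with
            | mk v' b =>
              rw [hresG, hres] at hp1 hp2
              simp only at hp1 hp2
              rw [hp1, hp2]
              cases b with
              | true => exact ⟨rfl, rfl⟩
              | false => exact ih v' fing

theorem pvDfsG_proj (g : List (String × List String)) :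
    ∀ fuel node v st fin,
      (pvDfsG g fuel node v st fin).1 = (pvDfs g fuel node v st).1 ∧
      (pvDfsG g fuel node v st fin).2.2 = (pvDfs g fuel node v st).2 := by
  intro fuel
  induction fuel with
  | zero => intro node v st fin; exact ⟨rfl, rfl⟩
  | succ f ih =>
    intro node v st fin
    rw [pvDfsG, pvDfs]
    obtain ⟨h1, h2⟩ :=
      pvGoG_proj (pvDfs g f) (pvDfsG g f) (PySem.Set.add st node)
        (fun q w fn => ih q w (PySem.Set.add st node) fn)
        (pvGet g node) (PySem.Set.add v node) fin
    cases hresG : pvGoG (pvDfsG g f) (PySem.Set.add st node)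
        (pvGet g node) (PySem.Set.add v node) fin with
    | mk vg rest =>
      cases rest with
      | mk fing bg =>
        cases hres : pvDfsGo (pvDfs g f) (PySem.Set.add st node)
            (pvGet g node) (PySem.Set.add v node) with
        | mk v' b =>
          rw [hresG, hres] at h1 h2
          simp only at h1 h2
          rw [h1, h2]
          cases b with
          | true => exact ⟨rfl, rfl⟩
          | false => exact ⟨rfl, rfl⟩

theorem pvMainG_proj (g : List (String × List String)) :
    ∀ ks v fin, pvMainG g ks v fin = pvMain g ks v := by
  intro ks
  induction ks with
  | nil => intro v fin; rfl
  | cons k ks ih =>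
    intro v fin
    rw [pvMainG, pvMain]
    by_cases hk : PySem.Set.contains v k = true
    · rw [hk]
      simp only [Bool.not_true, Bool.false_eq_true, if_false]
      exact ih v fin
    · have hkf : PySem.Set.contains v k = false := by
        rcases Bool.eq_false_or_eq_true (PySem.Set.contains v k) with ht | hfb
        · exact absurd ht hk
        · exact hfb
      rw [hkf]
      simp only [Bool.not_false, if_true]
      obtain ⟨h1, h2⟩ := pvDfsG_proj g (pvFuel g) k v PySem.Set.empty fin
      cases hresG : pvDfsG g (pvFuel g) k v PySem.Set.empty fin with
      | mk vg rest =>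
        cases rest with
        | mk fing bg =>
          cases hres : pvDfs g (pvFuel g) k v PySem.Set.empty with
          | mk v' b =>
            rw [hresG, hres] at h1 h2
            simp only at h1 h2
            rw [h1, h2]
            cases b with
            | true => rfl
            | false => exact ih v' fing

def pvClosed (g : List (String × List String)) (fin : List String) : Prop :=
  ∀ u ∈ fin, ∀ p ∈ pvGet g u, p ∈ fin ∧ fin.idxOf p < fin.idxOf u

def pvGInv (g : List (String × List String)) (st : PySem.Set String)
    (fin : List String) (res : PySem.Set String × List String × Bool) : Prop :=
  (∀ x, x ∈ res.1 ↔ x ∈ st ∨ x ∈ res.2.1) ∧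
  (∀ x ∈ st, x ∉ res.2.1) ∧
  pvClosed g res.2.1 ∧ res.2.1.Nodup ∧
  (∃ δ, res.2.1 = fin ++ δ)

theorem pvGoG_inv (g : List (String × List String)) (st : PySem.Set String)
    (dfsFG : String → PySem.Set String → PySem.Set String → List String →
      PySem.Set String × List String × Bool)
    (hdfs : ∀ q v fin, q ∉ v → (∀ x, x ∈ v ↔ x ∈ st ∨ x ∈ fin) →
      (∀ x ∈ st, x ∉ fin) → pvClosed g fin → fin.Nodup →
      (dfsFG q v st fin).2.2 = false →
      pvGInv g st fin (dfsFG q v st fin) ∧ q ∈ (dfsFG q v st fin).2.1) :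
    ∀ ps v fin, (∀ x, x ∈ v ↔ x ∈ st ∨ x ∈ fin) → (∀ x ∈ st, x ∉ fin) →
      pvClosed g fin → fin.Nodup →
      (pvGoG dfsFG st ps v fin).2.2 = false →
      pvGInv g st fin (pvGoG dfsFG st ps v fin) ∧
      (∀ q ∈ ps, q ∈ (pvGoG dfsFG st ps v fin).2.1) := by
  intro ps
  induction ps with
  | nil =>
    intro v fin Hv Hd HC HN _
    exact ⟨⟨Hv, Hd, HC, HN, ⟨[], (List.append_nil fin).symm⟩⟩,
      fun q hq => absurd hq (List.not_mem_nil)⟩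
  | cons p ps ih =>
    intro v fin Hv Hd HC HN hfalse
    rw [pvGoG] at hfalse ⊢
    by_cases hst : PySem.Set.contains st p = true
    · rw [hst] at hfalse
      simp at hfalse
    · have hstf : PySem.Set.contains st p = false := by
        rcases Bool.eq_false_or_eq_true (PySem.Set.contains st p) with ht | hfb
        · exact absurd ht hst
        · exact hfb
      have hpst : p ∉ st := fun hm => hst ((PySem.Set.contains_iff _ _).mpr hm)
      rw [hstf] at hfalse ⊢
      simp only [Bool.false_eq_true, if_false] at hfalse ⊢
      by_cases hpv : PySem.Set.contains v p = true
      · rw [hpv] at hfalse ⊢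
        simp only [Bool.not_true, Bool.false_eq_true, if_false] at hfalse ⊢
        have hpfin : p ∈ fin := by
          rcases (Hv p).mp ((PySem.Set.contains_iff _ _).mp hpv) with h1 | h2
          · exact absurd h1 hpst
          · exact h2
        obtain ⟨⟨I1, I2, I3, I4, ⟨δ, hδ⟩⟩, hall⟩ := ih v fin Hv Hd HC HN hfalse
        refine ⟨⟨I1, I2, I3, I4, ⟨δ, hδ⟩⟩, ?_⟩
        intro q hq
        rcases List.mem_cons.mp hq with rfl | hq'
        · rw [hδ]; exact List.mem_append_left _ hpfin
        · exact hall q hq'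
      · have hpvf : PySem.Set.contains v p = false := by
          rcases Bool.eq_false_or_eq_true (PySem.Set.contains v p) with ht | hfb
          · exact absurd ht hpv
          · exact hfb
        have hpnv : p ∉ v := fun hm => hpv ((PySem.Set.contains_iff _ _).mpr hm)
        rw [hpvf] at hfalse ⊢
        simp only [Bool.not_false, if_true] at hfalse ⊢
        cases hres : dfsFG p v st fin with
        | mk v' rest =>
          cases rest with
          | mk fin1 b =>
            cases b with
            | true => rw [hres] at hfalse; simp at hfalse
            | false =>
              rw [hres] at hfalse
              simp only at hfalse
              have hspec := hdfs p v fin hpnv Hv Hd HC HN (by rw [hres])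
              rw [hres] at hspec
              obtain ⟨⟨I1', I2', I3', I4', ⟨δ1, hδ1'⟩⟩, hpfin1'⟩ := hspec
              have I1 : ∀ x, x ∈ v' ↔ x ∈ st ∨ x ∈ fin1 := I1'
              have I2 : ∀ x ∈ st, x ∉ fin1 := I2'
              have I3 : pvClosed g fin1 := I3'
              have I4 : fin1.Nodup := I4'
              have hδ1 : fin1 = fin ++ δ1 := hδ1'
              have hpfin1 : p ∈ fin1 := hpfin1'
              obtain ⟨⟨J1, J2, J3, J4, ⟨δ2, hδ2⟩⟩, hall⟩ :=
                ih v' fin1 I1 I2 I3 I4 hfalse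
              refine ⟨⟨J1, J2, J3, J4,
                ⟨δ1 ++ δ2, by rw [hδ2, hδ1, List.append_assoc]⟩⟩, ?_⟩
              intro q hq
              rcases List.mem_cons.mp hq with rfl | hq'
              · rw [hδ2]; exact List.mem_append_left _ hpfin1
              · exact hall q hq'

theorem pvDfsG_inv (g : List (String × List String)) :
    ∀ fuel node visited stack fin,
      node ∉ visited →
      (∀ x, x ∈ visited ↔ x ∈ stack ∨ x ∈ fin) →
      (∀ x ∈ stack, x ∉ fin) →
      pvClosed g fin → fin.Nodup →
      (pvDfsG g fuel node visited stack fin).2.2 = false →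
      pvGInv g stack fin (pvDfsG g fuel node visited stack fin) ∧
      node ∈ (pvDfsG g fuel node visited stack fin).2.1 := by
  intro fuel
  induction fuel with
  | zero =>
    intro node visited stack fin _ _ _ _ _ hfalse
    simp [pvDfsG] at hfalse
  | succ f ih =>
    intro node visited stack fin hnv Hv Hd HC HN hfalse
    have hnstack : node ∉ stack := fun h => hnv ((Hv node).mpr (Or.inl h))
    have hnfin : node ∉ fin := fun h => hnv ((Hv node).mpr (Or.inr h))
    have Hv1 : ∀ x, x ∈ PySem.Set.add visited node ↔
        x ∈ PySem.Set.add stack node ∨ x ∈ fin := by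
      intro x
      rw [PySem.Set.mem_add, PySem.Set.mem_add, Hv x]
      tauto
    have Hd1 : ∀ x ∈ PySem.Set.add stack node, x ∉ fin := by
      intro x hx
      rcases (PySem.Set.mem_add _ _ _).mp hx with h1 | h2
      · exact Hd x h1
      · subst h2; exact hnfin
    rw [pvDfsG] at hfalse ⊢
    cases hres : pvGoG (pvDfsG g f) (PySem.Set.add stack node)
        (pvGet g node) (PySem.Set.add visited node) fin with
    | mk v2 rest =>
      cases rest with
      | mk fin2 bg =>
        cases bg with
        | true => rw [hres] at hfalse; simp at hfalse
        | false =>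
          rw [hres] at hfalse
          simp only at hfalse
          have hgo := pvGoG_inv g (PySem.Set.add stack node) (pvDfsG g f)
            (fun q v fn hq hv hd hc hn hf =>
              ⟨((ih q v (PySem.Set.add stack node) fn hq hv hd hc hn hf).1),
               ((ih q v (PySem.Set.add stack node) fn hq hv hd hc hn hf).2)⟩)
            (pvGet g node) (PySem.Set.add visited node) fin Hv1 Hd1 HC HN
            (by rw [hres])
          rw [hres] at hgo
          obtain ⟨⟨I1', I2', I3', I4', ⟨δ, hδ'⟩⟩, hall'⟩ := hgo
          have I1 : ∀ x, x ∈ v2 ↔ x ∈ PySem.Set.add stack node ∨ x ∈ fin2 := I1'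
          have I2 : ∀ x ∈ PySem.Set.add stack node, x ∉ fin2 := I2'
          have I3 : pvClosed g fin2 := I3'
          have I4 : fin2.Nodup := I4'
          have hδ : fin2 = fin ++ δ := hδ'
          have hall : ∀ q ∈ pvGet g node, q ∈ fin2 := hall'
          have hnfin2 : node ∉ fin2 :=
            I2 node ((PySem.Set.mem_add _ _ _).mpr (Or.inr rfl))
          refine ⟨⟨?_, ?_, ?_, ?_, ?_⟩, ?_⟩
          · show ∀ x, x ∈ v2 ↔ x ∈ stack ∨ x ∈ fin2 ++ [node]
            intro x
            rw [I1 x, PySem.Set.mem_add]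
            simp only [List.mem_append, List.mem_singleton]
            tauto
          · show ∀ x ∈ stack, x ∉ fin2 ++ [node]
            intro x hx hmem
            rcases List.mem_append.mp hmem with h1 | h2
            · exact I2 x ((PySem.Set.mem_add _ _ _).mpr (Or.inl hx)) h1
            · rw [List.mem_singleton] at h2; subst h2; exact hnstack hx
          · show pvClosed g (fin2 ++ [node])
            intro u hu q hq
            rcases List.mem_append.mp hu with hu1 | hu2
            · obtain ⟨hq1, hidx⟩ := I3 u hu1 q hq
              refine ⟨List.mem_append_left _ hq1, ?_⟩
              rw [List.idxOf_append_of_mem hq1, List.idxOf_append_of_mem hu1]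
              exact hidx
            · rw [List.mem_singleton] at hu2
              subst hu2
              have hq2 : q ∈ fin2 := hall q hq
              refine ⟨List.mem_append_left _ hq2, ?_⟩
              rw [List.idxOf_append_of_mem hq2, List.idxOf_append_of_notMem hnfin2]
              have := List.idxOf_lt_length_of_mem hq2
              omega
          · show (fin2 ++ [node]).Nodup
            rw [List.nodup_append]
            exact ⟨I4, List.nodup_singleton _,
              fun a ha b hb => by
                rw [List.mem_singleton] at hb
                subst hb
                exact fun he => hnfin2 (he ▸ ha)⟩
          · show ∃ δ', fin2 ++ [node] = fin ++ δ'
            exact ⟨δ ++ [node], by rw [hδ, List.append_assoc]⟩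
          · show node ∈ fin2 ++ [node]
            exact List.mem_append_right _ (List.mem_singleton.mpr rfl)

theorem pvMainG_acyc (g : List (String × List String)) :
    ∀ ks visited fin,
      (∀ x, x ∈ visited ↔ x ∈ fin) → pvClosed g fin → fin.Nodup →
      pvMainG g ks visited fin = true →
      ∃ fin', pvClosed g fin' ∧ (∃ δ, fin' = fin ++ δ) ∧ (∀ k ∈ ks, k ∈ fin') := by
  intro ks
  induction ks with
  | nil =>
    intro visited fin Hv HC HN _
    exact ⟨fin, HC, ⟨[], (List.append_nil fin).symm⟩,
      fun k hk => absurd hk (List.not_mem_nil)⟩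
  | cons k ks ih =>
    intro visited fin Hv HC HN htrue
    rw [pvMainG] at htrue
    by_cases hk : PySem.Set.contains visited k = true
    · rw [hk] at htrue
      simp only [Bool.not_true, Bool.false_eq_true, if_false] at htrue
      obtain ⟨fin', hC', ⟨δ, hδ⟩, hks⟩ := ih visited fin Hv HC HN htrue
      refine ⟨fin', hC', ⟨δ, hδ⟩, ?_⟩
      intro x hx
      rcases List.mem_cons.mp hx with rfl | hx'
      · have : x ∈ fin := (Hv x).mp ((PySem.Set.contains_iff _ _).mp hk)
        rw [hδ]; exact List.mem_append_left _ this
      · exact hks x hx'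
    · have hkf : PySem.Set.contains visited k = false := by
        rcases Bool.eq_false_or_eq_true (PySem.Set.contains visited k) with ht | hfb
        · exact absurd ht hk
        · exact hfb
      have hknv : k ∉ visited := fun hm => hk ((PySem.Set.contains_iff _ _).mpr hm)
      rw [hkf] at htrue
      simp only [Bool.not_false, if_true] at htrue
      cases hres : pvDfsG g (pvFuel g) k visited PySem.Set.empty fin with
      | mk v' rest =>
        cases rest with
        | mk fin1 b =>
          cases b with
          | true => rw [hres] at htrue; simp at htrue
          | false =>
            rw [hres] at htrue
            simp only at htrue
            have hinv := pvDfsG_inv g (pvFuel g) k visited PySem.Set.empty fin hknv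
              (by intro x; rw [Hv x]; simp [PySem.Set.empty])
              (by intro x hx; simp [PySem.Set.empty] at hx)
              HC HN (by rw [hres])
            rw [hres] at hinv
            obtain ⟨⟨I1', -, C1', N1', ⟨δ1, hδ1'⟩⟩, hkfin1'⟩ := hinv
            have I1 : ∀ x, x ∈ v' ↔ x ∈ PySem.Set.empty ∨ x ∈ fin1 := I1'
            have C1 : pvClosed g fin1 := C1'
            have N1 : fin1.Nodup := N1'
            have hδ1 : fin1 = fin ++ δ1 := hδ1'
            have hkfin1 : k ∈ fin1 := hkfin1'
            obtain ⟨fin', hC', ⟨δ2, hδ2⟩, hks⟩ := ih v' fin1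
              (by intro x; rw [I1 x]; simp [PySem.Set.empty])
              C1 N1 htrue
            refine ⟨fin', hC',
              ⟨δ1 ++ δ2, by rw [hδ2, hδ1, List.append_assoc]⟩, ?_⟩
            intro x hx
            rcases List.mem_cons.mp hx with rfl | hx'
            · rw [hδ2]; exact List.mem_append_left _ hkfin1
            · exact hks x hx'

theorem pvA_true_acyc (g : List (String × List String))
    (h : is_acyclic g = true) : pvAcyc g := by
  unfold is_acyclic at h
  rw [← pvMainG_proj g (g.map Prod.fst) PySem.Set.empty []] at h
  obtain ⟨fin', hC, -, hkeys⟩ :=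
    pvMainG_acyc g (g.map Prod.fst) PySem.Set.empty []
      (by intro x; simp [PySem.Set.empty])
      (by intro u hu; cases hu) List.nodup_nil h
  exact ⟨fun u => fin'.idxOf u,
    fun u p hu hp _ => (hC u (hkeys u hu) p hp).2⟩

-- ===== VERDICT (by name: the statement is the Claim_ definition above) =====
theorem is_acyclic_spec : Claim_equal_is_acyclic := by
  intro g _
  unfold Spec_is_acyclic
  by_cases h : pvAcyc g
  · have ha : is_acyclic g = true := by
      unfold is_acyclic
      exact pvMain_true g h _ _ (fun k hk => hk) (by simp [PySem.Set.empty])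
    have hb : is_acyclic_alt g = true := by
      rcases Bool.eq_false_or_eq_true (is_acyclic_alt g) with ht | hf
      · exact ht
      · exact absurd h (pvPrune_false g _ (fun x hx => (PySem.Set.mem_ofList _ _).mp hx) hf)
    rw [ha, hb]
  · have ha : is_acyclic g = false := by
      rcases Bool.eq_false_or_eq_true (is_acyclic g) with ht | hf
      · exact absurd (pvA_true_acyc g ht) h
      · exact hf
    have hb : is_acyclic_alt g = false := by
      rcases Bool.eq_false_or_eq_true (is_acyclic_alt g) with ht | hf
      · exfalso
        rcases pvPrune_rank g _ ht with ⟨r, hrk⟩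
        exact h ⟨r, fun u p hu hp hpk =>
          hrk u p ((PySem.Set.mem_ofList _ _).mpr hu) hp ((PySem.Set.mem_ofList _ _).mpr hpk)⟩
      · exact hf
    rw [ha, hb]
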